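-- pv_equiv track=rewrite | github.com/alikadirguzel/unides_spam_filter | src/filter/lexicon.py | _match_phrases
-- ===== SOURCE A (Python) =====
-- from typing import Dict, Iterable, Set, Tuple
--
-- def _match_phrases(tokens: list[str], phrases: Set[Tuple[str, ...]]) -> Set[str]:
--     """
--     Token listesi içinde ardışık n-gram eşleşmesi.
--     """
--     if not phrases or not tokens:
--         return set()
--
--     hits: Set[str] = set()
--     for phrase in phrases:
--         n = len(phrase)
--         if n == 0 or n > len(tokens):
--             continue
--         for i in range(0, len(tokens) - n + 1):
--             if tuple(tokens[i : i + n]) == phrase: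
--                 # display_value phrase tokenlarında olmayabilir; direkt phrase string olarak ekliyoruz
--                 hits.add(" ".join(phrase))
--                 break
--     return hits
-- ===== SOURCE B (Python) =====
-- from typing import Set, Tuple
--
-- def _match_phrases(tokens: list[str], phrases: Set[Tuple[str, ...]]) -> Set[str]:
--     """Index phrases by first token, then one pass over token positions."""
--     if not phrases or not tokens:
--         return set()
--     index: dict = {}
--     for phrase in phrases:
--         if phrase:
--             index[phrase[0]] = index.get(phrase[0], []) + [phrase]
--     matched = set()
--     for i in range(len(tokens)):
--         for phrase in index.get(tokens[i], []):
--             n = len(phrase)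
--             if i + n <= len(tokens) and tuple(tokens[i : i + n]) == phrase:
--                 matched.add(phrase)
--     return {" ".join(p) for p in phrases if p in matched}
-- ===== Notes on version B (the rewrite author's own statement) =====
-- stated objective: faster
-- what changed: Replaces A's per-phrase full scan of the token list by a first-token index built once from the phrases plus a single pass over token positions that only verifies the candidate phrases starting with that token.
import Mathlib
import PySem

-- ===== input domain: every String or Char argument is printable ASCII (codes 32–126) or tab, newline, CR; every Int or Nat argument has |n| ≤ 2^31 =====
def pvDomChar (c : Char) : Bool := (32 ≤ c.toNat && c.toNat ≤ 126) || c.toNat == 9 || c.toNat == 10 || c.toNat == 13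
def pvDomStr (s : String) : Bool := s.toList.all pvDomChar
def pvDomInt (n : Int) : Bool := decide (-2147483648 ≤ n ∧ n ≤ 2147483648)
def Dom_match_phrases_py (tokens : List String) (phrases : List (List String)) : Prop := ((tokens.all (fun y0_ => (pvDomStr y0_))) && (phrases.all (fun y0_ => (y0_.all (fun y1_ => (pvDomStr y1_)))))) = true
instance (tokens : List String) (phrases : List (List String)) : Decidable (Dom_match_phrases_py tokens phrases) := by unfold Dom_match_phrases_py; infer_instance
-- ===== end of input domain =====

-- B is faster: instead of A scanning the whole token list once per phrase, it builds a first-token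
-- index over the phrases and makes one pass over token positions, verifying only candidate phrases
-- starting with that token (measured faster in a timing run); proved to return the same list.


-- ===== PORT A =====
-- A's inner 'for i in range(0, len(tokens)-n+1): if tuple(tokens[i:i+n]) == phrase: hits.add(" ".join(phrase)); break'
def pvInnerA (tokens phrase : List String) (hits : PySem.Set String) : List Int → PySem.Set String
  | [] => hits
  | i :: rest =>
    if PySem.List.slice tokens (some i) (some (i + (phrase.length : Int))) = phrase then
      PySem.Set.add hits (PySem.Str.join " " phrase)
    else pvInnerA tokens phrase hits rest

def match_phrases_py (tokens : List String) (phrases : List (List String)) : List String :=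
  if phrases = [] ∨ tokens = [] then []
  else
    phrases.foldl (fun hits phrase =>
      if phrase.length = 0 ∨ phrase.length > tokens.length then hits
      else pvInnerA tokens phrase hits
        (PySem.List.pyRange 0 ((tokens.length : Int) - (phrase.length : Int) + 1) 1))
      PySem.Set.empty

-- ===== PORT B =====
-- B's 'index[phrase[0]] = index.get(phrase[0], []) + [phrase]' loop (skipping empty phrases)
def pvIndexB (phrases : List (List String)) : PySem.Dict String (List (List String)) :=
  phrases.foldl (fun d phrase =>
    match phrase with
    | [] => d
    | t :: _ => d.insert t (d.getD t [] ++ [phrase])) PySem.Dict.empty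

-- B's 'for i in range(len(tokens)): for phrase in index.get(tokens[i], []): …' loop
def pvMatchedB (tokens : List String) (index : PySem.Dict String (List (List String))) :
    PySem.Set (List String) :=
  (PySem.List.pyRange 0 (tokens.length : Int) 1).foldl (fun m i =>
    (index.getD (PySem.List.pyGetD tokens i "") []).foldl (fun m phrase =>
      if i + (phrase.length : Int) ≤ (tokens.length : Int) ∧
         PySem.List.slice tokens (some i) (some (i + (phrase.length : Int))) = phrase
      then PySem.Set.add m phrase else m) m) PySem.Set.empty

-- B's final '{" ".join(p) for p in phrases if p in matched}'
def pvEmitB (matched : PySem.Set (List String)) (phrases : List (List String)) : PySem.Set String :=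
  phrases.foldl (fun hits p =>
    if PySem.Set.contains matched p then PySem.Set.add hits (PySem.Str.join " " p) else hits)
    PySem.Set.empty

def match_phrases_py_alt (tokens : List String) (phrases : List (List String)) : List String :=
  if phrases = [] ∨ tokens = [] then []
  else pvEmitB (pvMatchedB tokens (pvIndexB phrases)) phrases

-- ===== PRECONDITION & SPEC =====
def Spec_match_phrases_py (tokens : List String) (phrases : List (List String)) (out : List String) : Prop := out = match_phrases_py_alt tokens phrases
instance (tokens : List String) (phrases : List (List String)) (out : List String) : Decidable (Spec_match_phrases_py tokens phrases out) := by unfold Spec_match_phrases_py; infer_instance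

-- ===== CLAIM (what is proved, stated in full; the proofs are below) =====
def Claim_equal_match_phrases_py : Prop := ∀ (tokens : List String) (phrases : List (List String)), Dom_match_phrases_py tokens phrases → Spec_match_phrases_py tokens phrases (match_phrases_py tokens phrases)

-- ===== LEMMAS AND PROOFS =====

-- A's inner loop adds the joined phrase iff some position in the range matches.
theorem pvInnerA_eq (tokens phrase : List String) (hits : PySem.Set String) (r : List Int) :
    pvInnerA tokens phrase hits r =
      if ∃ i ∈ r, PySem.List.slice tokens (some i) (some (i + (phrase.length : Int))) = phrase
      then PySem.Set.add hits (PySem.Str.join " " phrase) else hits := by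
  induction r with
  | nil => simp [pvInnerA]
  | cons i rest ih =>
    simp only [pvInnerA]
    by_cases h : PySem.List.slice tokens (some i) (some (i + (phrase.length : Int))) = phrase
    · simp [h]
    · rw [if_neg h, ih]
      simp [h]

-- the first-token index: lookup under t collects, in order, the phrases whose head is t
theorem pvIndexB_getD (phrases : List (List String)) (t : String) :
    (pvIndexB phrases).getD t [] = phrases.filter (fun p => p.head? = some t) := by
  suffices h : ∀ (l : List (List String)) (d : PySem.Dict String (List (List String))),
      (l.foldl (fun d phrase =>
        match phrase with
        | [] => d
        | t' :: _ => d.insert t' (d.getD t' [] ++ [phrase])) d).getD t []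
      = d.getD t [] ++ (l.filter (fun p => p.head? = some t)) by
    rw [pvIndexB, h]; simp
  intro l
  induction l with
  | nil => simp
  | cons p rest ih =>
    intro d
    cases p with
    | nil => simpa using ih d
    | cons h tl =>
      rw [List.foldl_cons]
      show (rest.foldl _ (d.insert h (d.getD h [] ++ [h :: tl]))).getD t [] = _
      rw [ih]
      by_cases ht : t = h
      · subst ht
        simp
      · simp [PySem.Dict.getD_insert, ht, Ne.symm ht]

-- membership in the inner fold over the candidate phrases at position i
theorem pvInnerB_mem (tokens : List String) (i : Int) (cands : List (List String))
    (m : PySem.Set (List String)) (p : List String) :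
    p ∈ cands.foldl (fun m phrase =>
          if i + (phrase.length : Int) ≤ (tokens.length : Int) ∧
             PySem.List.slice tokens (some i) (some (i + (phrase.length : Int))) = phrase
          then PySem.Set.add m phrase else m) m
      ↔ p ∈ m ∨ (p ∈ cands ∧ i + (p.length : Int) ≤ (tokens.length : Int) ∧
          PySem.List.slice tokens (some i) (some (i + (p.length : Int))) = p) := by
  induction cands generalizing m with
  | nil => simp
  | cons q rest ih =>
    rw [List.foldl_cons]
    by_cases hq : i + (q.length : Int) ≤ (tokens.length : Int) ∧
        PySem.List.slice tokens (some i) (some (i + (q.length : Int))) = q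
    · rw [if_pos hq, ih]
      simp only [PySem.Set.mem_add, List.mem_cons]
      constructor
      · rintro (⟨h | rfl⟩ | h)
        · exact Or.inl h
        · exact Or.inr ⟨Or.inl rfl, hq⟩
        · exact Or.inr ⟨Or.inr h.1, h.2⟩
      · rintro (h | ⟨(rfl | h), hc⟩)
        · exact Or.inl (Or.inl h)
        · exact Or.inl (Or.inr rfl)
        · exact Or.inr ⟨h, hc⟩
    · rw [if_neg hq, ih]
      constructor
      · rintro (h | h)
        · exact Or.inl h
        · exact Or.inr ⟨List.mem_cons_of_mem _ h.1, h.2⟩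
      · rintro (h | ⟨hmem, hc⟩)
        · exact Or.inl h
        · rcases List.mem_cons.mp hmem with rfl | h
          · exact absurd hc hq
          · exact Or.inr ⟨h, hc⟩

-- membership in B's 'matched' set
theorem pvMatchedB_mem (tokens : List String) (index : PySem.Dict String (List (List String)))
    (p : List String) :
    p ∈ pvMatchedB tokens index
      ↔ ∃ i ∈ PySem.List.pyRange 0 (tokens.length : Int) 1,
          p ∈ index.getD (PySem.List.pyGetD tokens i "") [] ∧
          i + (p.length : Int) ≤ (tokens.length : Int) ∧
          PySem.List.slice tokens (some i) (some (i + (p.length : Int))) = p := by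
  rw [pvMatchedB]
  suffices h : ∀ (r : List Int) (m : PySem.Set (List String)),
      p ∈ r.foldl (fun m i =>
          (index.getD (PySem.List.pyGetD tokens i "") []).foldl (fun m phrase =>
            if i + (phrase.length : Int) ≤ (tokens.length : Int) ∧
               PySem.List.slice tokens (some i) (some (i + (phrase.length : Int))) = phrase
            then PySem.Set.add m phrase else m) m) m
      ↔ p ∈ m ∨ ∃ i ∈ r, p ∈ index.getD (PySem.List.pyGetD tokens i "") [] ∧
          i + (p.length : Int) ≤ (tokens.length : Int) ∧
          PySem.List.slice tokens (some i) (some (i + (p.length : Int))) = p by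
    rw [h]; simp [PySem.Set.empty]
  intro r
  induction r with
  | nil => simp
  | cons i rest ih =>
    intro m
    rw [List.foldl_cons, ih, pvInnerB_mem]
    constructor
    · rintro ((h | h) | ⟨j, hj, hc⟩)
      · exact Or.inl h
      · exact Or.inr ⟨i, List.mem_cons_self, h⟩
      · exact Or.inr ⟨j, List.mem_cons_of_mem _ hj, hc⟩
    · rintro (h | ⟨j, hj, hc⟩)
      · exact Or.inl (Or.inl h)
      · rcases List.mem_cons.mp hj with rfl | hj
        · exact Or.inl (Or.inr hc)
        · exact Or.inr ⟨j, hj, hc⟩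

-- a matching nonempty slice forces the phrase's head to be the token at position i
theorem pvSlice_head (tokens p : List String) (i : Int) (h0 : 0 ≤ i)
    (hlen : i + (p.length : Int) ≤ (tokens.length : Int)) (hp : p ≠ [])
    (hs : PySem.List.slice tokens (some i) (some (i + (p.length : Int))) = p) :
    p.head? = some (PySem.List.pyGetD tokens i "") := by
  have hn : 0 < p.length := List.length_pos_iff.mpr hp
  have hi : i.toNat < tokens.length := by omega
  rw [PySem.List.slice_toNat tokens h0 (by omega)] at hs
  have h2 := congrArg List.head? hs
  rw [List.head?_take, List.head?_drop] at h2
  rw [PySem.List.pyGetD_of_nonneg tokens "" h0]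
  have ht : (i + (p.length : Int)).toNat - i.toNat = p.length := by omega
  rw [ht] at h2
  simp only [List.getD_eq_getElem?_getD]
  rw [if_neg (by omega)] at h2
  rw [← h2]
  simp [hi]

-- the two per-phrase conditions coincide for p ∈ phrases
theorem pvCond_iff (tokens : List String) (phrases : List (List String)) (p : List String)
    (hp : p ∈ phrases) :
    (¬ (p.length = 0 ∨ p.length > tokens.length) ∧
      ∃ i ∈ PySem.List.pyRange 0 ((tokens.length : Int) - (p.length : Int) + 1) 1,
        PySem.List.slice tokens (some i) (some (i + (p.length : Int))) = p)
    ↔ p ∈ pvMatchedB tokens (pvIndexB phrases) := by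
  rw [pvMatchedB_mem]
  constructor
  · rintro ⟨hne, i, hir, hs⟩
    push Not at hne
    obtain ⟨hne0, hnle⟩ := hne
    have hn : 0 < p.length := Nat.pos_of_ne_zero hne0
    rw [PySem.List.mem_pyRange_one] at hir
    obtain ⟨h0, hlt⟩ := hir
    have hlen : i + (p.length : Int) ≤ (tokens.length : Int) := by omega
    refine ⟨i, ?_, ?_, hlen, hs⟩
    · rw [PySem.List.mem_pyRange_one]
      exact ⟨h0, by omega⟩
    · rw [pvIndexB_getD, List.mem_filter]
      refine ⟨hp, ?_⟩
      simpa using pvSlice_head tokens p i h0 hlen (List.length_pos_iff.mp hn) hs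
  · rintro ⟨i, hir, hmem, hlen, hs⟩
    rw [PySem.List.mem_pyRange_one] at hir
    rw [pvIndexB_getD, List.mem_filter] at hmem
    have hp0 : p ≠ [] := by
      intro h; subst h; simp at hmem
    have hn : 0 < p.length := List.length_pos_iff.mpr hp0
    refine ⟨by push Not; omega, i, ?_, hs⟩
    rw [PySem.List.mem_pyRange_one]
    omega

-- ===== VERDICT (by name: the statement is the Claim_ definition above) =====
theorem match_phrases_py_spec : Claim_equal_match_phrases_py := by
  intro tokens phrases _
  unfold Spec_match_phrases_py match_phrases_py match_phrases_py_alt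
  by_cases hbase : phrases = [] ∨ tokens = []
  · rw [if_pos hbase, if_pos hbase]
  · rw [if_neg hbase, if_neg hbase, pvEmitB]
    apply PySem.List.foldl_congr_mem
    intro hits p hp
    have hiff := pvCond_iff tokens phrases p hp
    by_cases hc : ¬ (p.length = 0 ∨ p.length > tokens.length) ∧
        ∃ i ∈ PySem.List.pyRange 0 ((tokens.length : Int) - (p.length : Int) + 1) 1,
          PySem.List.slice tokens (some i) (some (i + (p.length : Int))) = p
    · rw [if_neg hc.1, pvInnerA_eq, if_pos hc.2,
        if_pos ((PySem.Set.contains_iff _ _).mpr (hiff.mp hc))]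
    · have hnm : PySem.Set.contains (pvMatchedB tokens (pvIndexB phrases)) p = false := by
        rw [Bool.eq_false_iff]
        intro hcon
        exact hc (hiff.mpr ((PySem.Set.contains_iff _ _).mp hcon))
      rw [hnm]
      simp only [Bool.false_eq_true, if_false]
      by_cases h0 : p.length = 0 ∨ p.length > tokens.length
      · rw [if_pos h0]
      · rw [if_neg h0, pvInnerA_eq, if_neg (fun hex => hc ⟨h0, hex⟩)]
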